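-- pv_equiv track=rewrite | github.com/tadeokondrak/plover_controller | plover_controller/util.py | get_keys_for_stroke
-- ===== SOURCE A (Python) =====
-- def get_keys_for_stroke(stroke_str: str) -> tuple[str, ...]:
--     keys: list[str] = []
--     passed_hyphen = False
--     no_hyphen_keys = set("!@#$%^&*")
--     for key in stroke_str:
--         if key == "-":
--             passed_hyphen = True
--             continue
--         if key in no_hyphen_keys:
--             keys.append(key)
--         elif passed_hyphen:
--             keys.append(f"-{key}")
--         else:
--             keys.append(f"{key}-")
--     return tuple(keys)
-- ===== SOURCE B (Python) =====
-- def get_keys_for_stroke(stroke_str: str) -> tuple[str, ...]: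
--     before, _sep, after = stroke_str.partition("-")
--     keys = [c if c in "!@#$%^&*" else f"{c}-" for c in before]
--     keys += [c if c in "!@#$%^&*" else f"-{c}" for c in after if c != "-"]
--     return tuple(keys)
-- ===== Notes on version B (the rewrite author's own statement) =====
-- stated objective: simpler
-- what changed: Replaces the stateful passed_hyphen flag loop with a partition at the first hyphen followed by two stateless comprehensions over the before/after segments.
import Mathlib
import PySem

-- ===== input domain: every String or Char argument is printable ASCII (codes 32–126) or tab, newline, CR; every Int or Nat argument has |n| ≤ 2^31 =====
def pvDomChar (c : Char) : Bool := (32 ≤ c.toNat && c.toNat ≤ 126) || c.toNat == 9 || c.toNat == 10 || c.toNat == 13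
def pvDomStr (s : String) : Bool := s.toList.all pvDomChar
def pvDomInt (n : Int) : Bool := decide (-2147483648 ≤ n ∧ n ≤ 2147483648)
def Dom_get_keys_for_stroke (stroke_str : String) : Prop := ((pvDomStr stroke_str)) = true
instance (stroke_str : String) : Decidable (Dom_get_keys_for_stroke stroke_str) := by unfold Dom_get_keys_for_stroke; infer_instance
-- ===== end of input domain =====

-- B replaces A's stateful passed_hyphen flag loop by a partition at the first hyphen
-- and two stateless per-segment passes (objective: simpler).

-- ===== PORT A =====
-- set("!@#$%^&*") : a fixed set of characters; membership tested per char
def pvNoHyphenKeysA : List Char := ['!', '@', '#', '$', '%', '^', '&', '*']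

-- the for-loop over stroke_str with state (keys, passed_hyphen)
def get_keys_for_stroke (stroke_str : String) : List String :=
  (stroke_str.toList.foldl
    (fun (st : List String × Bool) key =>
      if key = '-' then (st.1, true)
      else if key ∈ pvNoHyphenKeysA then (st.1 ++ [key.toString], st.2)
      else if st.2 then (st.1 ++ ["-" ++ key.toString], st.2)
      else (st.1 ++ [key.toString ++ "-"], st.2))
    ([], false)).1

-- ===== PORT B =====
def pvNoHyphenKeysB : List Char := "!@#$%^&*".toList

-- str.partition('-'): before = chars up to the first '-', after = chars past it
def get_keys_for_stroke_alt (stroke_str : String) : List String :=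
  let cs := stroke_str.toList
  let before := cs.takeWhile (fun c => c ≠ '-')
  let after := (cs.dropWhile (fun c => c ≠ '-')).drop 1
  (before.map (fun c => if c ∈ pvNoHyphenKeysB then c.toString else c.toString ++ "-"))
    ++ ((after.filter (fun c => c ≠ '-')).map
        (fun c => if c ∈ pvNoHyphenKeysB then c.toString else "-" ++ c.toString))

-- ===== PRECONDITION & SPEC =====
def Spec_get_keys_for_stroke (stroke_str : String) (out : List String) : Prop := out = get_keys_for_stroke_alt stroke_str
instance (stroke_str : String) (out : List String) : Decidable (Spec_get_keys_for_stroke stroke_str out) := by unfold Spec_get_keys_for_stroke; infer_instance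

-- ===== CLAIM (what is proved, stated in full; the proofs are below) =====
def Claim_equal_get_keys_for_stroke : Prop := ∀ (stroke_str : String), Dom_get_keys_for_stroke stroke_str → Spec_get_keys_for_stroke stroke_str (get_keys_for_stroke stroke_str)

-- ===== LEMMAS AND PROOFS =====

-- abbreviation for A's loop step
def pvStepA (st : List String × Bool) (key : Char) : List String × Bool :=
  if key = '-' then (st.1, true)
  else if key ∈ pvNoHyphenKeysA then (st.1 ++ [key.toString], st.2)
  else if st.2 then (st.1 ++ ["-" ++ key.toString], st.2)
  else (st.1 ++ [key.toString ++ "-"], st.2)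

lemma foldl_true (cs : List Char) : ∀ acc : List String,
    cs.foldl pvStepA (acc, true)
      = (acc ++ (cs.filter (fun c => c ≠ '-')).map
          (fun c => if c ∈ pvNoHyphenKeysA then c.toString else "-" ++ c.toString), true) := by
  induction cs with
  | nil => simp
  | cons c cs ih =>
    intro acc
    by_cases hc : c = '-'
    · subst hc; simp [pvStepA, ih]
    · by_cases hk : c ∈ pvNoHyphenKeysA <;>
        simp [pvStepA, hc, hk, ih]

lemma foldl_false (cs : List Char) : ∀ acc : List String,
    (cs.foldl pvStepA (acc, false)).1
      = acc ++ ((cs.takeWhile (fun c => c ≠ '-')).map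
            (fun c => if c ∈ pvNoHyphenKeysA then c.toString else c.toString ++ "-"))
          ++ ((((cs.dropWhile (fun c => c ≠ '-')).drop 1).filter (fun c => c ≠ '-')).map
            (fun c => if c ∈ pvNoHyphenKeysA then c.toString else "-" ++ c.toString)) := by
  induction cs with
  | nil => simp
  | cons c cs ih =>
    intro acc
    by_cases hc : c = '-'
    · subst hc
      simp [pvStepA, foldl_true]
    · by_cases hk : c ∈ pvNoHyphenKeysA <;>
        simp [pvStepA, hc, hk, ih]

-- ===== VERDICT (by name: the statement is the Claim_ definition above) =====
theorem get_keys_for_stroke_spec : Claim_equal_get_keys_for_stroke := by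
  intro s _
  show _ = _
  have hB : pvNoHyphenKeysB = pvNoHyphenKeysA := by decide
  simp only [get_keys_for_stroke, get_keys_for_stroke_alt, hB]
  rw [show (fun (st : List String × Bool) key =>
      if key = '-' then (st.1, true)
      else if key ∈ pvNoHyphenKeysA then (st.1 ++ [key.toString], st.2)
      else if st.2 then (st.1 ++ ["-" ++ key.toString], st.2)
      else (st.1 ++ [key.toString ++ "-"], st.2)) = pvStepA from rfl]
  rw [foldl_false]
  simp
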